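-- pv_equiv track=rewrite | github.com/Ausium/udi_Scripts | elk_week/elk_weekly.py | convert_sum
-- ===== SOURCE A (Python) =====
-- def convert_sum(ip_sum):
--     """将每天的IP数据统计出pv和uv"""
--     new_ip_sum = {}
--     for item in ip_sum.values():
--         for ip, num in item.items():
--             new_ip_sum[ip] = new_ip_sum.get(ip, 0) + num
--     pv = sum(new_ip_sum.values())
--     uv = len(new_ip_sum)
--     return pv, uv
-- ===== SOURCE B (Python) =====
-- def convert_sum(ip_sum):
--     """将每天的IP数据统计出pv和uv"""
--     pairs = [(ip, num) for item in ip_sum.values() for ip, num in item.items()]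
--     pv = sum(num for _, num in pairs)
--     uv = 0
--     prev = None
--     for ip in sorted(ip for ip, _ in pairs):
--         if ip != prev:
--             uv += 1
--             prev = ip
--     return pv, uv
-- ===== Notes on version B (the rewrite author's own statement) =====
-- stated objective: alternative
-- what changed: Instead of merging counts into a per-IP dict and then summing/measuring it, B flattens all (ip,num) pairs into one list, sums the nums directly, and counts distinct IPs by sorting the keys and scanning for adjacent changes (sort-then-scan instead of hash aggregation).
import Mathlib
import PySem

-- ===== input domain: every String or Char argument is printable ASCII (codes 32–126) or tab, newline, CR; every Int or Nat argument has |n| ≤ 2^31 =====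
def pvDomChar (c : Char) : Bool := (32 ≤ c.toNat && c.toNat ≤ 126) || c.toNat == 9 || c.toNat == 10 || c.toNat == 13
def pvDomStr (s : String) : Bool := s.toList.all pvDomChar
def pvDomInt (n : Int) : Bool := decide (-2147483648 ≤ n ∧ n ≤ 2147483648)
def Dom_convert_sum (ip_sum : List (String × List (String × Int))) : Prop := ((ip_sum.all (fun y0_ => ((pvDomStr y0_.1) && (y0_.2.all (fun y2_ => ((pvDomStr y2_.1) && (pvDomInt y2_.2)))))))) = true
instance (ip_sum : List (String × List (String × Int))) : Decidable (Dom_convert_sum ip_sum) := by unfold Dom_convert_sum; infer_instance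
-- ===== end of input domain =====

-- B avoids A's merged per-IP count dict: it flattens the (ip, num) pairs, sums the nums directly,
-- and counts distinct IPs by sorting the keys and scanning for adjacent changes (alternative algorithm, same result).

-- ===== PORT A =====
-- new_ip_sum[ip] = new_ip_sum.get(ip, 0) + num over the nested loops; then sum(values), len.
def convert_sum (ip_sum : List (String × List (String × Int))) : Int × Int :=
  let new_ip_sum : PySem.Dict String Int :=
    ((PySem.Dict.ofList ip_sum).values).foldl
      (fun d item =>
        ((PySem.Dict.ofList item).items).foldl
          (fun d p => d.insert p.1 (d.getD p.1 0 + p.2)) d)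
      PySem.Dict.empty
  (new_ip_sum.values.sum, (new_ip_sum.size : Int))

-- ===== PORT B =====
-- pairs = flattened (ip, num) list; pv = sum of nums; uv = scan of sorted keys counting changes.
def convert_sum_alt (ip_sum : List (String × List (String × Int))) : Int × Int :=
  let pairs : List (String × Int) :=
    ((PySem.Dict.ofList ip_sum).values).flatMap (fun item => (PySem.Dict.ofList item).items)
  let pv : Int := (pairs.map (fun p => p.2)).sum
  let r : Int × Option String :=
    (PySem.List.sorted (pairs.map (fun p => p.1)) (fun x => x) false).foldl
      (fun acc ip => if some ip ≠ acc.2 then (acc.1 + 1, some ip) else acc)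
      (0, none)
  (pv, r.1)

-- ===== PRECONDITION & SPEC =====
def Spec_convert_sum (ip_sum : List (String × List (String × Int))) (out : Int × Int) : Prop := out = convert_sum_alt ip_sum
instance (ip_sum : List (String × List (String × Int))) (out : Int × Int) : Decidable (Spec_convert_sum ip_sum out) := by unfold Spec_convert_sum; infer_instance

-- ===== CLAIM (what is proved, stated in full; the proofs are below) =====
def Claim_equal_convert_sum : Prop := ∀ (ip_sum : List (String × List (String × Int))), Dom_convert_sum ip_sum → Spec_convert_sum ip_sum (convert_sum ip_sum)

-- ===== LEMMAS AND PROOFS =====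

-- overwriting the value at a key not present in the list changes nothing
lemma overwrite_map_id (l : List (String × Int)) (k : String) (w : Int)
    (h : ∀ p ∈ l, p.1 ≠ k) :
    l.map (fun p => if p.1 == k then (k, w) else p) = l := by
  conv_rhs => rw [← List.map_id l]
  apply List.map_congr_left
  intro p hp
  simp [h p hp]

-- overwriting the (unique) entry at key k changes the value-sum by w - old
lemma overwrite_sum (l : List (String × Int)) (k : String) (old w : Int)
    (hnd : (l.map (·.1)).Nodup) (hm : (k, old) ∈ l) :
    ((l.map (fun p => if p.1 == k then (k, w) else p)).map (·.2)).sum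
      = (l.map (·.2)).sum - old + w := by
  induction l with
  | nil => simp at hm
  | cons q t ih =>
    simp only [List.map_cons, List.nodup_cons] at hnd
    rcases List.mem_cons.mp hm with hq | ht
    · subst hq
      have hne : ∀ p ∈ t, p.1 ≠ k := by
        intro p hp hpk
        exact hnd.1 (List.mem_map.mpr ⟨p, hp, hpk⟩)
      simp only [List.map_cons, List.sum_cons]
      rw [if_pos (by simp), overwrite_map_id t k w hne]
      simp
      ring
    · have hq : q.1 ≠ k := by
        intro hqk
        exact hnd.1 (List.mem_map.mpr ⟨(k, old), ht, hqk.symm⟩)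
      simp only [List.map_cons, List.sum_cons]
      rw [if_neg (by simpa using hq), ih hnd.2 ht]
      ring

-- one accumulating insert bumps the value-sum by v
lemma sum_values_insert (d : PySem.Dict String Int) (k : String) (v : Int)
    (h : d.keys.Nodup) :
    (d.insert k (d.getD k 0 + v)).values.sum = d.values.sum + v := by
  by_cases hc : d.contains k = true
  · obtain ⟨old, hg⟩ : ∃ old, d.get? k = some old := by
      rw [PySem.Dict.contains_eq_isSome_get?] at hc
      exact Option.isSome_iff_exists.mp hc
    have hmem : (k, old) ∈ d.items := PySem.Dict.mem_items_of_get?_eq_some d hg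
    have hgD : d.getD k 0 = old := PySem.Dict.getD_of_get?_eq_some d 0 hg
    have hitems := PySem.Dict.items_insert_of_contains d (d.getD k 0 + v) hc
    simp only [PySem.Dict.values, hitems]
    have hnd : (d.items.map (·.1)).Nodup := h
    rw [overwrite_sum d.items k old (d.getD k 0 + v) hnd hmem, hgD]
    ring
  · have hc' : d.contains k = false := by simpa using hc
    have hitems := PySem.Dict.items_insert_of_not_contains d (d.getD k 0 + v) hc'
    simp only [PySem.Dict.values, hitems]
    rw [PySem.Dict.getD_of_not_contains d 0 hc']
    simp

-- A's inner loop over an item's pairs: value-sum grows by the sum of the nums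
lemma innerA_sum (ps : List (String × Int)) (d : PySem.Dict String Int)
    (h : d.keys.Nodup) :
    (ps.foldl (fun d p => d.insert p.1 (d.getD p.1 0 + p.2)) d).values.sum
      = d.values.sum + (ps.map (·.2)).sum := by
  induction ps generalizing d with
  | nil => simp
  | cons p t ih =>
    simp only [List.foldl_cons, List.map_cons, List.sum_cons]
    rw [ih _ (PySem.Dict.nodup_keys_insert d p.1 _ h), sum_values_insert d p.1 p.2 h]
    ring

-- A's whole nested loop, characterised: value-sum, keys, and key-uniqueness
lemma A_fold_char (L : List (List (String × Int))) (d : PySem.Dict String Int)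
    (h : d.keys.Nodup) :
    (L.foldl
        (fun d item =>
          ((PySem.Dict.ofList item).items).foldl
            (fun d p => d.insert p.1 (d.getD p.1 0 + p.2)) d) d).values.sum
      = d.values.sum
        + ((L.flatMap (fun item => (PySem.Dict.ofList item).items)).map (·.2)).sum
    ∧ (L.foldl
        (fun d item =>
          ((PySem.Dict.ofList item).items).foldl
            (fun d p => d.insert p.1 (d.getD p.1 0 + p.2)) d) d).keys
      = PySem.Set.update d.keys
          ((L.flatMap (fun item => (PySem.Dict.ofList item).items)).map (·.1))
    ∧ (L.foldl
        (fun d item =>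
          ((PySem.Dict.ofList item).items).foldl
            (fun d p => d.insert p.1 (d.getD p.1 0 + p.2)) d) d).keys.Nodup := by
  induction L generalizing d with
  | nil => simp [PySem.Set.update, h]
  | cons item t ih =>
    have hkeys := PySem.Dict.keys_foldl_insert_key
      ((PySem.Dict.ofList item).items) (·.1)
      (fun d p => d.getD p.1 0 + p.2) d
    have hnd' := PySem.Dict.nodup_keys_foldl_insert_key
      ((PySem.Dict.ofList item).items) (·.1)
      (fun d p => d.getD p.1 0 + p.2) d h
    obtain ⟨ih1, ih2, ih3⟩ := ih _ hnd'
    refine ⟨?_, ?_, ?_⟩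
    · simp only [List.foldl_cons, List.flatMap_cons, List.map_append, List.sum_append]
      rw [ih1, innerA_sum _ d h]
      ring
    · simp only [List.foldl_cons, List.flatMap_cons, List.map_append]
      rw [ih2, hkeys]
      simp [PySem.Set.update, List.foldl_append]
    · simpa only [List.foldl_cons] using ih3

-- (filter ≠ k) as a Finset is erase
lemma filter_ne_toFinset (t : List String) (k : String) :
    (t.filter (fun x => decide (x ≠ k))).toFinset = t.toFinset.erase k := by
  ext x
  simp [Finset.mem_erase, and_comm]

-- |insert k S| = |S.erase k| + 1
lemma card_insert_erase (k : String) (S : Finset String) :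
    (insert k S).card = (S.erase k).card + 1 := by
  by_cases hk : k ∈ S
  · rw [Finset.insert_eq_self.mpr hk, Finset.card_erase_of_mem hk]
    have : 1 ≤ S.card := Finset.card_pos.mpr ⟨k, hk⟩
    omega
  · rw [Finset.card_insert_of_notMem hk, Finset.erase_eq_of_notMem hk]

-- B's scan over a sorted tail with current sentinel a counts the distinct non-a elements
lemma countFold (l : List String) (c : Int) (a : String)
    (ha : ∀ x ∈ l, a ≤ x) (hp : l.Pairwise (· ≤ ·)) :
    (l.foldl (fun acc ip => if some ip ≠ acc.2 then (acc.1 + 1, some ip) else acc)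
        (c, some a)).1
      = c + ((l.filter (fun x => decide (x ≠ a))).toFinset.card : Int) := by
  induction l generalizing c a with
  | nil => simp
  | cons k t ih =>
    rcases List.pairwise_cons.mp hp with ⟨hk, hpt⟩
    by_cases hka : k = a
    · subst hka
      rw [List.foldl_cons,
        if_neg (show ¬(some k ≠ ((c, some k) : Int × Option String).2) by simp),
        List.filter_cons_of_neg (by simp)]
      exact ih c k (fun x hx => ha x (List.mem_cons_of_mem _ hx)) hpt
    · have hlt : a < k := lt_of_le_of_ne (ha k (List.mem_cons_self)) (Ne.symm hka)
      rw [List.foldl_cons,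
        if_pos (show (some k ≠ ((c, some a) : Int × Option String).2) by simp [hka]),
        ih (c + 1) k hk hpt]
      have hfilt : (k :: t).filter (fun x => decide (x ≠ a)) = k :: t := by
        rw [List.filter_eq_self]
        intro x hx
        rcases List.mem_cons.mp hx with rfl | hxt
        · simpa using hka
        · have : a < x := lt_of_lt_of_le hlt (hk x hxt)
          simpa using (ne_of_gt this)
      rw [hfilt]
      rw [show (k :: t).toFinset = insert k t.toFinset from List.toFinset_cons,
        card_insert_erase k t.toFinset, filter_ne_toFinset]
      push_cast
      ring

-- B's whole scan from (0, None) on a sorted list counts the distinct elements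
lemma countFold_top (l : List String) (hp : l.Pairwise (· ≤ ·)) :
    (l.foldl (fun acc ip => if some ip ≠ acc.2 then (acc.1 + 1, some ip) else acc)
        ((0 : Int), (none : Option String))).1
      = (l.toFinset.card : Int) := by
  cases l with
  | nil => simp
  | cons k t =>
    rcases List.pairwise_cons.mp hp with ⟨hk, hpt⟩
    rw [List.foldl_cons,
      if_pos (show (some k ≠ (((0 : Int), (none : Option String))).2) by simp),
      countFold t (0 + 1) k hk hpt, filter_ne_toFinset,
      show (k :: t).toFinset = insert k t.toFinset from List.toFinset_cons,
      card_insert_erase k t.toFinset]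
    push_cast
    ring

-- a Nodup list has the cardinality of its element set
lemma nodup_length_toFinset (l : List String) (h : l.Nodup) :
    l.length = l.toFinset.card := by
  rw [List.toFinset_card_of_nodup h]

-- ===== VERDICT (by name: the statement is the Claim_ definition above) =====
theorem convert_sum_spec : Claim_equal_convert_sum := by
  intro ip_sum _
  unfold Spec_convert_sum convert_sum convert_sum_alt
  dsimp only
  obtain ⟨h1, h2, h3⟩ := A_fold_char ((PySem.Dict.ofList ip_sum).values)
    PySem.Dict.empty PySem.Dict.nodup_keys_empty
  set L := (PySem.Dict.ofList ip_sum).values with hL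
  set flat := L.flatMap (fun item => (PySem.Dict.ofList item).items) with hflat
  set d' := L.foldl
      (fun d item =>
        ((PySem.Dict.ofList item).items).foldl
          (fun d p => d.insert p.1 (d.getD p.1 0 + p.2)) d)
      PySem.Dict.empty with hd'
  -- the two value-sums agree
  have hpv : d'.values.sum = (flat.map (fun p => p.2)).sum := by
    rw [h1]; simp [PySem.Dict.values, PySem.Dict.empty]
  -- the two distinct-IP counts agree
  have hsorted : (PySem.List.sorted (flat.map (fun p => p.1)) (fun x => x) false).Pairwise
      (fun a b => a ≤ b) :=
    PySem.List.sorted_pairwise (flat.map (fun p => p.1)) (fun x => x)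
  have hcount := countFold_top (PySem.List.sorted (flat.map (fun p => p.1)) (fun x => x) false) hsorted
  have hperm : (PySem.List.sorted (flat.map (fun p => p.1)) (fun x => x) false).toFinset
      = (flat.map (fun p => p.1)).toFinset :=
    List.toFinset_eq_of_perm _ _ (PySem.List.sorted_perm (flat.map (fun p => p.1)) (fun x => x) false)
  have hkeysfin : d'.keys.toFinset = (flat.map (fun p => p.1)).toFinset := by
    ext x
    rw [h2]
    have hupd : PySem.Set.update (PySem.Dict.empty : PySem.Dict String Int).keys
          (flat.map (fun p => p.1))
        = PySem.Set.ofList (flat.map (fun p => p.1)) := rfl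
    rw [hupd]
    simp [PySem.Set.mem_ofList]
  have hsize : (d'.size : Int) = (flat.map (fun p => p.1)).toFinset.card := by
    have h4 : d'.size = d'.keys.length := by
      simp [PySem.Dict.size, PySem.Dict.keys]
    rw [h4, nodup_length_toFinset d'.keys h3, hkeysfin]
  rw [hpv, hsize, ← hperm, ← hcount]
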